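-- pv_equiv track=rewrite | github.com/luizrennocosta/comp1ufrj | listas/lista1/submissions/123677128_lista1.py | questao1
-- ===== SOURCE A (Python) =====
-- def questao1(n, ar):
--     contagem_de_cores = {}
--
--     pares = 0
--
--     for cor in ar:
--         if cor in contagem_de_cores:
--             contagem_de_cores[cor] += 1
--         else:
--             contagem_de_cores[cor] = 1
--
--     for cor, quantidade in contagem_de_cores.items():
--         pares += quantidade // 2
--
--     return pares
-- ===== SOURCE B (Python) =====
-- def questao1(n, ar):
--     odd = set()
--     for cor in ar:
--         if cor in odd:
--             odd.discard(cor)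
--         else:
--             odd.add(cor)
--     return (len(ar) - len(odd)) // 2
-- ===== Notes on version B (the rewrite author's own statement) =====
-- stated objective: alternative
-- what changed: Replaces the frequency dictionary and the second accumulation loop over its items with a single parity-toggling set pass, returning (len(ar) - #odd-frequency colours) // 2 via the identity sum(c//2) = (total - odd)//2.
import Mathlib
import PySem

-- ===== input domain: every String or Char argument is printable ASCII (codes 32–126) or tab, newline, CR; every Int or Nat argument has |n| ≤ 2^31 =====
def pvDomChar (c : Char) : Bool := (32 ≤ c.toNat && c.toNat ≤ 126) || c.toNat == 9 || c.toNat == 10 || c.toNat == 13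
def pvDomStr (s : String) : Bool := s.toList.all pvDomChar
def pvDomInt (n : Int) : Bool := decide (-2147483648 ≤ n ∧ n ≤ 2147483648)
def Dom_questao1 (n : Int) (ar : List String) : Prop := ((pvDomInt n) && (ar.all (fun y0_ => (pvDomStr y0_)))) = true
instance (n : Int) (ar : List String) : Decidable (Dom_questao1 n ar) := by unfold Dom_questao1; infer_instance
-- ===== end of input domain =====

-- B replaces A's frequency dictionary and second loop over its items by one parity-toggling
-- set pass plus the closed form (len(ar) - #odd-frequency colours) // 2; same return value.

-- ===== PORT A =====
def questao1 (n : Int) (ar : List String) : Int :=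
  let contagem_de_cores : PySem.Dict String Int :=
    ar.foldl (fun d cor =>
      if d.contains cor then d.insert cor (d.getD cor 0 + 1)
      else d.insert cor 1) PySem.Dict.empty
  contagem_de_cores.items.foldl (fun pares kv => pares + PySem.Int.floordiv kv.2 2) 0

-- ===== PORT B =====
def questao1_alt (n : Int) (ar : List String) : Int :=
  let odd : PySem.Set String :=
    ar.foldl (fun s cor =>
      if PySem.Set.contains s cor then PySem.Set.discard s cor
      else PySem.Set.add s cor) PySem.Set.empty
  PySem.Int.floordiv ((ar.length : Int) - PySem.Set.len odd) 2

-- ===== PRECONDITION & SPEC =====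
def Spec_questao1 (n : Int) (ar : List String) (out : Int) : Prop := out = questao1_alt n ar
instance (n : Int) (ar : List String) (out : Int) : Decidable (Spec_questao1 n ar out) := by unfold Spec_questao1; infer_instance

-- ===== CLAIM (what is proved, stated in full; the proofs are below) =====
def Claim_equal_questao1 : Prop := ∀ (n : Int) (ar : List String), Dom_questao1 n ar → Spec_questao1 n ar (questao1 n ar)

-- ===== LEMMAS AND PROOFS =====

-- A's counting loop is the standard Counter build.
lemma build_eq_counter (ar : List String) :
    ar.foldl (fun d cor =>
      if d.contains cor then d.insert cor (d.getD cor 0 + 1)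
      else d.insert cor 1) (PySem.Dict.empty : PySem.Dict String Int)
    = PySem.Dict.counter ar := by
  rw [← PySem.Dict.foldl_insert_getD_add_one_eq_counter]
  congr 1
  funext d cor
  by_cases h : d.contains cor
  · simp [h]
  · rw [PySem.Dict.getD_of_not_contains d 0 (by simpa using h)]
    simp [h]

-- B's toggle loop: result is nodup and holds x iff membership in the start xor an odd count in ar.
lemma toggle_invariant (ar : List String) : ∀ (s : PySem.Set String), s.Nodup →
    (ar.foldl (fun s cor =>
      if PySem.Set.contains s cor then PySem.Set.discard s cor
      else PySem.Set.add s cor) s).Nodup ∧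
    ∀ x, x ∈ ar.foldl (fun s cor =>
      if PySem.Set.contains s cor then PySem.Set.discard s cor
      else PySem.Set.add s cor) s ↔ ((x ∈ s) ↔ ar.count x % 2 = 0) := by
  induction ar with
  | nil => intro s hs; refine ⟨hs, ?_⟩; intro x; simp
  | cons c rest ih =>
    intro s hs
    simp only [List.foldl_cons]
    by_cases hc : c ∈ s
    · rw [if_pos ((PySem.Set.contains_iff s c).mpr hc)]
      obtain ⟨hn, hm⟩ := ih (PySem.Set.discard s c) (PySem.Set.nodup_discard _ _ hs)
      refine ⟨hn, ?_⟩
      intro x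
      rw [hm x, PySem.Set.mem_discard]
      by_cases hxc : x = c
      · subst hxc
        simp [hc, List.count_cons_self]
        omega
      · simp [hxc, Ne.symm hxc]
    · rw [if_neg (by simp [hc])]
      obtain ⟨hn, hm⟩ := ih (PySem.Set.add s c) (PySem.Set.nodup_add _ _ hs)
      refine ⟨hn, ?_⟩
      intro x
      rw [hm x, PySem.Set.mem_add]
      by_cases hxc : x = c
      · subst hxc
        simp [hc, List.count_cons_self]
        omega
      · simp [hxc, Ne.symm hxc]

-- length of B's toggle result = number of distinct odd-count colours.
lemma toggle_length (ar : List String) :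
    (ar.foldl (fun s cor =>
      if PySem.Set.contains s cor then PySem.Set.discard s cor
      else PySem.Set.add s cor) (PySem.Set.empty : PySem.Set String)).length
    = (PySem.Set.ofList ar).countP (fun k => ar.count k % 2 = 1) := by
  obtain ⟨hn, hm⟩ := toggle_invariant ar PySem.Set.empty (by simp [PySem.Set.empty])
  have hperm : (ar.foldl (fun s cor =>
      if PySem.Set.contains s cor then PySem.Set.discard s cor
      else PySem.Set.add s cor) (PySem.Set.empty : PySem.Set String)).Perm
      ((PySem.Set.ofList ar).filter (fun k => decide (ar.count k % 2 = 1))) := by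
    rw [List.perm_ext_iff_of_nodup hn (List.Nodup.filter _ (PySem.Set.nodup_ofList ar))]
    intro x
    rw [hm x, List.mem_filter, PySem.Set.mem_ofList]
    constructor
    · intro h
      have hodd : ar.count x % 2 = 1 := by
        simp [PySem.Set.empty] at h; omega
      exact ⟨List.count_pos_iff.mp (by omega), by simpa using hodd⟩
    · intro ⟨_, h⟩
      simp only [decide_eq_true_eq] at h
      simp [PySem.Set.empty]; omega
  rw [hperm.length_eq, List.countP_eq_length_filter]

-- generic: ∑ g = 2 * ∑ (g // 2) + ∑ (g % 2) over a list.
lemma sum_split_div_mod (l : List String) (g : String → Int) :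
    (l.map g).sum
    = 2 * (l.map (fun x => PySem.Int.floordiv (g x) 2)).sum
      + (l.map (fun x => PySem.Int.mod (g x) 2)).sum := by
  induction l with
  | nil => simp
  | cons c rest ih =>
    have h := PySem.Int.floordiv_mul_add_mod (g c) 2
    simp only [List.map_cons, List.sum_cons, ih]
    linarith

-- ∑ over nat-counts of (count % 2) = number of odd counts.
lemma sum_mod_eq_countP (l : List String) (f : String → Nat) :
    (l.map (fun x => PySem.Int.mod (f x : Int) 2)).sum
    = ((l.countP (fun k => f k % 2 = 1) : Nat) : Int) := by
  induction l with
  | nil => simp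
  | cons c rest ih =>
    rw [List.map_cons, List.sum_cons, ih, List.countP_cons]
    have : PySem.Int.mod ((f c : Nat) : Int) 2 = ((f c % 2 : Nat) : Int) :=
      PySem.Int.mod_natCast (f c) 2
    rw [this]
    by_cases h : f c % 2 = 1
    · simp [h]; ring
    · have h0 : f c % 2 = 0 := by omega
      simp [h0]

-- ∑ over the distinct colours of their counts = length of ar.
lemma sum_counts_eq_length (ar : List String) :
    ((PySem.Set.ofList ar).map (fun k => ((ar.count k : Nat) : Int))).sum
    = (ar.length : Int) := by
  have hperm : (PySem.Set.ofList ar).Perm ar.dedup := by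
    rw [List.perm_ext_iff_of_nodup (PySem.Set.nodup_ofList ar) ar.nodup_dedup]
    intro x
    rw [PySem.Set.mem_ofList, List.mem_dedup]
  calc ((PySem.Set.ofList ar).map (fun k => ((ar.count k : Nat) : Int))).sum
      = (ar.dedup.map (fun k => ((ar.count k : Nat) : Int))).sum :=
        (hperm.map _).sum_eq
    _ = (((ar.dedup.map (fun k => ar.count k)).sum : Nat) : Int) := by
        rw [Nat.cast_list_sum, List.map_map]; rfl
    _ = (ar.length : Int) := by
        rw [List.sum_map_count_dedup_eq_length]

-- ===== VERDICT (by name: the statement is the Claim_ definition above) =====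
theorem questao1_spec : Claim_equal_questao1 := by
  intro n ar _
  show questao1 n ar = questao1_alt n ar
  have hB : questao1_alt n ar = PySem.Int.floordiv ((ar.length : Int)
      - PySem.Set.len (ar.foldl (fun s cor =>
          if PySem.Set.contains s cor then PySem.Set.discard s cor
          else PySem.Set.add s cor) (PySem.Set.empty : PySem.Set String))) 2 := rfl
  have hA0 : questao1 n ar = (ar.foldl (fun d cor =>
      if d.contains cor then d.insert cor (d.getD cor 0 + 1)
      else d.insert cor 1) (PySem.Dict.empty : PySem.Dict String Int)).items.foldl
        (fun pares kv => pares + PySem.Int.floordiv kv.2 2) 0 := rfl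
  rw [hA0, hB, build_eq_counter]
  have hA : (PySem.Dict.counter ar).items.foldl
      (fun pares kv => pares + PySem.Int.floordiv kv.2 2) 0
      = ((PySem.Set.ofList ar).map
          (fun k => PySem.Int.floordiv ((ar.count k : Nat) : Int) 2)).sum := by
    rw [PySem.List.foldl_add (PySem.Dict.counter ar).items
        (fun kv : String × Int => PySem.Int.floordiv kv.2 2) 0,
        PySem.Dict.items_counter, List.map_map]
    simp [Function.comp_def]
  rw [hA]
  have hsplit := sum_split_div_mod (PySem.Set.ofList ar)
      (fun k => ((ar.count k : Nat) : Int))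
  rw [sum_counts_eq_length, sum_mod_eq_countP] at hsplit
  have hlen : PySem.Set.len (ar.foldl (fun s cor =>
      if PySem.Set.contains s cor then PySem.Set.discard s cor
      else PySem.Set.add s cor) (PySem.Set.empty : PySem.Set String))
      = (((PySem.Set.ofList ar).countP (fun k => ar.count k % 2 = 1) : Nat) : Int) := by
    show ((ar.foldl (fun s cor =>
      if PySem.Set.contains s cor then PySem.Set.discard s cor
      else PySem.Set.add s cor) (PySem.Set.empty : PySem.Set String)).length : Int) = _
    rw [toggle_length]
  rw [hlen]
  have h2 : (ar.length : Int)
      - (((PySem.Set.ofList ar).countP (fun k => ar.count k % 2 = 1) : Nat) : Int)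
      = 2 * ((PySem.Set.ofList ar).map
          (fun k => PySem.Int.floordiv ((ar.count k : Nat) : Int) 2)).sum := by
    linarith
  rw [h2, PySem.Int.floordiv_eq_ediv_of_pos (by norm_num),
      Int.mul_ediv_cancel_left _ (by norm_num)]
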